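-- pv_equiv track=rewrite | github.com/AndresKarch/Entregable1_Karchesky_Williner | entrega1.py | result
-- ===== SOURCE A (Python) =====
-- def result(state, action):
--     new_state = [list(frasco) for frasco in state]
--     origen, destino = action
--     destino -= 1
--     origen -= 1
--     color = new_state[origen][-1]
--
--     # Transferimos todo el líquido del color superior posible
--     while new_state[origen] and new_state[origen][-1] == color and len(new_state[destino]) < 4:
--         new_state[destino].append(new_state[origen].pop())
--     return tuple(tuple(frasco) for frasco in new_state)
-- ===== SOURCE B (Python) =====
-- def result(state, action):
--     origen, destino = action
--     src = state[origen - 1]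
--     color = src[-1]
--     dst = state[destino - 1]
--     k = 0
--     for x in reversed(src):
--         if x != color:
--             break
--         k += 1
--     amount = min(k, 4 - len(dst))
--     out = [tuple(f) for f in state]
--     out[origen - 1] = tuple(src[:len(src) - amount])
--     out[destino - 1] = tuple(dst) + (color,) * amount
--     return tuple(out)
-- ===== Notes on version B (the rewrite author's own statement) =====
-- stated objective: alternative
-- what changed: Replaces A's per-unit pop/append mutation loop with a bulk computation: count the run of top-color units once, take amount = min(run, 4 - len(dest)), and rebuild the state by slicing the source and extending the destination; Pre_ excludes only inputs where A raises IndexError (out-of-range flask index, empty source) or where A's while loop never terminates (pour onto the same flask holding fewer than 4 units).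
import Mathlib
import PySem

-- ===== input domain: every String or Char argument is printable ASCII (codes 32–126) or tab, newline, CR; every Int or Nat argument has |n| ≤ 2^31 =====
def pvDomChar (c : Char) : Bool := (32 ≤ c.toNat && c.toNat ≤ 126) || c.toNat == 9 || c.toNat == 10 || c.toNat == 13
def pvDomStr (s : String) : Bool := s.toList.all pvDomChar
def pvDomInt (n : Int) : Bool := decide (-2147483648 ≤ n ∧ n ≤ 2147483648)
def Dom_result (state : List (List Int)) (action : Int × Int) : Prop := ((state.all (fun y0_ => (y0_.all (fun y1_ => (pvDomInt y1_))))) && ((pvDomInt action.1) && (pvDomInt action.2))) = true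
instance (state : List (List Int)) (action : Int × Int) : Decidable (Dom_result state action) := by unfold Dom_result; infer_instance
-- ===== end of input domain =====

-- B replaces A's per-unit pop/append loop with a bulk count-then-slice rebuild (alternative decomposition, same cost).

-- shared primitive: `xs[i] = v` with Python index semantics (negative counts from the end;
-- out of range leaves the list unchanged — unreachable under Pre_, where Python already raised).
def pySetAt (ns : List (List Int)) (i : Int) (v : List Int) : List (List Int) :=
  let j := if i < 0 then i + ns.length else i
  if 0 ≤ j ∧ j < (ns.length : Int) then ns.set j.toNat v else ns

-- ===== PORT A =====
-- the while loop of A; fuel 5 suffices wherever the Python loop terminates (the destination gains a unit each iteration, capped at 4)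
def resultLoop : Nat → List (List Int) → Int → Int → Int → List (List Int)
  | 0, ns, _, _, _ => ns
  | fuel+1, ns, o, d, color =>
    let src := (PySem.List.pyGet? ns o).getD []
    let dst := (PySem.List.pyGet? ns d).getD []
    if src ≠ [] ∧ src.getLast? = some color ∧ dst.length < 4 then
      let top := src.getLast?.getD 0
      let ns1 := pySetAt ns o src.dropLast
      let dst1 := (PySem.List.pyGet? ns1 d).getD []
      resultLoop fuel (pySetAt ns1 d (dst1 ++ [top])) o d color
    else ns

def result (state : List (List Int)) (action : Int × Int) : List (List Int) :=
  let origen := action.1 - 1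
  let destino := action.2 - 1
  match PySem.List.pyGet? state origen with
  | none => []            -- Python raises IndexError here (excluded by Pre_)
  | some src =>
    match PySem.List.pyGet? src (-1) with
    | none => []          -- Python raises IndexError here (excluded by Pre_)
    | some color => resultLoop 5 state origen destino color

-- ===== PORT B =====
-- the `for x in reversed(src): if x != color: break; k += 1` loop of Source B
def runLen : List Int → Int → Nat
  | [], _ => 0
  | x :: xs, c => if x = c then runLen xs c + 1 else 0

def result_alt (state : List (List Int)) (action : Int × Int) : List (List Int) :=
  let origen := action.1
  let destino := action.2
  match PySem.List.pyGet? state (origen - 1) with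
  | none => []            -- Python raises IndexError here (excluded by Pre_)
  | some src =>
    match PySem.List.pyGet? src (-1) with
    | none => []          -- Python raises IndexError here (excluded by Pre_)
    | some color =>
      match PySem.List.pyGet? state (destino - 1) with
      | none => []        -- Python raises IndexError here (excluded by Pre_)
      | some dst =>
        let k : Int := runLen src.reverse color
        let amount : Int := min k (4 - (dst.length : Int))
        let out1 := pySetAt state (origen - 1) (PySem.List.slice src none (some ((src.length : Int) - amount)))
        pySetAt out1 (destino - 1) (dst ++ List.replicate amount.toNat color)

-- ===== PRECONDITION & SPEC =====
-- Pre_ excludes exactly the inputs on which A does not return: out-of-range flask indices and an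
-- empty source flask (IndexError), and a pour onto the same flask when it holds fewer than 4
-- units (A's while loop never terminates there).
def Pre_result (state : List (List Int)) (action : Int × Int) : Prop :=
  let n : Int := state.length
  let o := if 0 ≤ action.1 - 1 then action.1 - 1 else action.1 - 1 + n
  let d := if 0 ≤ action.2 - 1 then action.2 - 1 else action.2 - 1 + n
  0 ≤ o ∧ o < n ∧ 0 ≤ d ∧ d < n ∧
  state.getD o.toNat [] ≠ [] ∧
  (o = d → 4 ≤ (state.getD o.toNat []).length)
instance (state : List (List Int)) (action : Int × Int) : Decidable (Pre_result state action) := by unfold Pre_result; infer_instance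

def pvWitness_result : List (List Int) × (Int × Int) := ([[1, 1], [2]], (1, 2))

def Spec_result (state : List (List Int)) (action : Int × Int) (out : List (List Int)) : Prop := out = result_alt state action
instance (state : List (List Int)) (action : Int × Int) (out : List (List Int)) : Decidable (Spec_result state action out) := by unfold Spec_result; infer_instance

-- ===== CLAIM (what is proved, stated in full; the proofs are below) =====
def Claim_equal_result : Prop := ∀ (state : List (List Int)) (action : Int × Int), Dom_result state action → Pre_result state action → Spec_result state action (result state action)

-- ===== LEMMAS AND PROOFS =====

-- index normalization ---------------------------------------------------------

theorem pyGet?_inrange {α : Type} (xs : List α) (i : Int)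
    (h0 : -(xs.length : Int) ≤ i) (h1 : i < (xs.length : Int)) :
    PySem.List.pyGet? xs i = xs[(if 0 ≤ i then i else i + xs.length).toNat]? := by
  by_cases h : 0 ≤ i
  · rw [if_pos h, PySem.List.pyGet?_of_nonneg xs h]
  · rw [if_neg h]
    have hk : i = -(((-i).toNat : Nat) : Int) := by omega
    rw [hk, PySem.List.pyGet?_neg_natCast _ _ (by omega) (by omega)]
    congr 1
    omega

theorem pySetAt_norm (ns : List (List Int)) (i : Int) (v : List Int)
    (h0 : -(ns.length : Int) ≤ i) (h1 : i < (ns.length : Int)) :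
    pySetAt ns i v = ns.set (if 0 ≤ i then i else i + ns.length).toNat v := by
  unfold pySetAt
  by_cases h : i < 0
  · rw [if_pos h, if_pos (by constructor <;> omega), if_neg (by omega)]
  · rw [if_neg h, if_pos (by constructor <;> omega), if_pos (by omega)]

theorem length_pySetAt (ns : List (List Int)) (i : Int) (v : List Int) :
    (pySetAt ns i v).length = ns.length := by
  unfold pySetAt
  split <;> (dsimp only; split <;> simp)

theorem resultLoop_shift (fuel : Nat) : ∀ (ns : List (List Int)) (o d o' d' color : Int),
    -(ns.length : Int) ≤ o → o < (ns.length : Int) →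
    -(ns.length : Int) ≤ d → d < (ns.length : Int) →
    o' = (if 0 ≤ o then o else o + ns.length) → d' = (if 0 ≤ d then d else d + ns.length) →
    resultLoop fuel ns o d color = resultLoop fuel ns o' d' color := by
  induction fuel with
  | zero => intro ns o d o' d' color _ _ _ _ _ _; rfl
  | succ fuel ih =>
    intro ns o d o' d' color ho0 ho1 hd0 hd1 ho' hd'
    have hono : 0 ≤ o' := by rw [ho']; split <;> omega
    have hond : 0 ≤ d' := by rw [hd']; split <;> omega
    have ho'lt : o' < (ns.length : Int) := by split at ho' <;> omega
    have hd'lt : d' < (ns.length : Int) := by split at hd' <;> omega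
    have hgo : PySem.List.pyGet? ns o = PySem.List.pyGet? ns o' := by
      rw [pyGet?_inrange ns o ho0 ho1, pyGet?_inrange ns o' (by omega) ho'lt]
      rw [if_pos hono, ho']
    have hgd : PySem.List.pyGet? ns d = PySem.List.pyGet? ns d' := by
      rw [pyGet?_inrange ns d hd0 hd1, pyGet?_inrange ns d' (by omega) hd'lt]
      rw [if_pos hond, hd']
    show resultLoop (fuel+1) ns o d color = resultLoop (fuel+1) ns o' d' color
    rw [resultLoop, resultLoop]
    simp only [hgo, hgd]
    split
    · have hso : ∀ v, pySetAt ns o v = pySetAt ns o' v := by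
        intro v
        rw [pySetAt_norm ns o v ho0 ho1, pySetAt_norm ns o' v (by omega) ho'lt]
        rw [if_pos hono, ho']
      have hlen : ∀ v, (pySetAt ns o' v).length = ns.length := fun v => length_pySetAt ..
      have hsd : ∀ v w, pySetAt (pySetAt ns o' v) d w = pySetAt (pySetAt ns o' v) d' w := by
        intro v w
        rw [pySetAt_norm (pySetAt ns o' v) d w (by rw [hlen]; omega) (by rw [hlen]; omega),
            pySetAt_norm (pySetAt ns o' v) d' w (by rw [hlen]; omega) (by rw [hlen]; omega)]
        rw [if_pos hond, hd', hlen]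
      have hgd1 : ∀ v, PySem.List.pyGet? (pySetAt ns o' v) d = PySem.List.pyGet? (pySetAt ns o' v) d' := by
        intro v
        rw [pyGet?_inrange (pySetAt ns o' v) d (by rw [hlen]; omega) (by rw [hlen]; omega),
            pyGet?_inrange (pySetAt ns o' v) d' (by rw [hlen]; omega) (by rw [hlen]; omega)]
        rw [if_pos hond, hd', hlen]
      rw [hso, hgd1, hsd]
      apply ih
      · rw [length_pySetAt, length_pySetAt]; omega
      · rw [length_pySetAt, length_pySetAt]; omega
      · rw [length_pySetAt, length_pySetAt]; omega
      · rw [length_pySetAt, length_pySetAt]; omega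
      · rw [length_pySetAt, length_pySetAt]; exact ho'
      · rw [length_pySetAt, length_pySetAt]; exact hd'
    · rfl

-- run length ------------------------------------------------------------------

theorem runLen_le_length (xs : List Int) (c : Int) : runLen xs c ≤ xs.length := by
  induction xs with
  | nil => simp [runLen]
  | cons x xs ih => rw [runLen]; split <;> simp <;> omega

theorem runLen_reverse_concat (ys : List Int) (y c : Int) :
    runLen (ys ++ [y]).reverse c = if y = c then runLen ys.reverse c + 1 else 0 := by
  rw [List.reverse_append, List.reverse_singleton, List.singleton_append, runLen]

theorem runLen_reverse_pos_iff (xs : List Int) (c : Int) :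
    0 < runLen xs.reverse c ↔ xs ≠ [] ∧ xs.getLast? = some c := by
  induction xs using List.reverseRecOn with
  | nil => simp [runLen]
  | append_singleton ys y _ =>
    rw [runLen_reverse_concat, List.getLast?_concat]
    constructor
    · intro h
      refine ⟨by simp, ?_⟩
      by_cases hy : y = c
      · rw [hy]
      · rw [if_neg hy] at h; omega
    · rintro ⟨-, h⟩
      rw [if_pos (by injection h)]
      omega

theorem runLen_reverse_step (xs : List Int) (c : Int) :
    xs.getLast? = some c → runLen xs.reverse c = runLen xs.dropLast.reverse c + 1 := by
  induction xs using List.reverseRecOn with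
  | nil => intro h; simp at h
  | append_singleton ys y _ =>
    intro hl
    rw [List.getLast?_concat] at hl
    injection hl with hy
    rw [List.dropLast_concat, runLen_reverse_concat, if_pos hy]

-- the loop performs the bulk transfer ------------------------------------------

theorem loop_spec (t : Nat) : ∀ (fuel : Nat) (ns : List (List Int)) (o d : Nat) (color : Int),
    o < ns.length → d < ns.length → o ≠ d →
    t = (min ((runLen (ns.getD o []).reverse color : Int)) (4 - ((ns.getD d []).length : Int))).toNat →
    t < fuel →
    resultLoop fuel ns (o : Int) (d : Int) color =
      (ns.set o ((ns.getD o []).take ((ns.getD o []).length - t))).set d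
        (ns.getD d [] ++ List.replicate t color) := by
  induction t with
  | zero =>
    intro fuel ns o d color ho hd hod ht hfuel
    obtain ⟨fuel, rfl⟩ : ∃ f, fuel = f + 1 := ⟨fuel - 1, by omega⟩
    rw [resultLoop]
    simp only [PySem.List.pyGet?_natCast]
    rw [List.getElem?_eq_getElem ho, List.getElem?_eq_getElem hd]
    simp only [Option.getD_some]
    rw [if_neg ?_]
    · rw [Nat.sub_zero, List.getD_eq_getElem _ _ ho, List.getD_eq_getElem _ _ hd,
        List.take_length, List.replicate_zero, List.append_nil,
        List.set_getElem_self, List.set_getElem_self]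
    · rintro ⟨h1, h2, h3⟩
      have hr : 0 < runLen ns[o].reverse color := (runLen_reverse_pos_iff _ _).mpr ⟨h1, h2⟩
      rw [List.getD_eq_getElem _ _ ho, List.getD_eq_getElem _ _ hd] at ht
      omega
  | succ t ih =>
    intro fuel ns o d color ho hd hod ht hfuel
    obtain ⟨fuel, rfl⟩ : ∃ f, fuel = f + 1 := ⟨fuel - 1, by omega⟩
    rw [List.getD_eq_getElem _ _ ho, List.getD_eq_getElem _ _ hd] at ht ⊢
    have hr : 0 < runLen ns[o].reverse color := by omega
    have hdl : ns[d].length < 4 := by omega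
    obtain ⟨hne, hlast⟩ := (runLen_reverse_pos_iff ns[o] color).mp hr
    rw [resultLoop]
    simp only [PySem.List.pyGet?_natCast]
    rw [List.getElem?_eq_getElem ho, List.getElem?_eq_getElem hd]
    simp only [Option.getD_some]
    rw [if_pos ⟨hne, hlast, hdl⟩]
    have htop : ns[o].getLast?.getD 0 = color := by rw [hlast]; rfl
    have hset1 : pySetAt ns (o : Int) ns[o].dropLast = ns.set o ns[o].dropLast := by
      rw [pySetAt_norm _ _ _ (by omega) (by exact_mod_cast ho), if_pos (by omega)]
      simp
    rw [htop, hset1]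
    rw [List.getElem?_set_ne hod, List.getElem?_eq_getElem hd]
    simp only [Option.getD_some]
    have hset2 : pySetAt (ns.set o ns[o].dropLast) (d : Int) (ns[d] ++ [color])
        = (ns.set o ns[o].dropLast).set d (ns[d] ++ [color]) := by
      rw [pySetAt_norm _ _ _ (by simp) (by simp <;> omega), if_pos (by omega)]
      simp
    rw [hset2]
    have ho2 : o < ((ns.set o ns[o].dropLast).set d (ns[d] ++ [color])).length := by simp; omega
    have hd2 : d < ((ns.set o ns[o].dropLast).set d (ns[d] ++ [color])).length := by simp; omega
    have hgo2 : ((ns.set o ns[o].dropLast).set d (ns[d] ++ [color]))[o]'ho2 = ns[o].dropLast := by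
      simp [List.getElem_set, hod, Ne.symm hod]
    have hgd2 : ((ns.set o ns[o].dropLast).set d (ns[d] ++ [color]))[d]'hd2 = ns[d] ++ [color] := by
      simp [List.getElem_set]
    have hstep := runLen_reverse_step ns[o] color hlast
    rw [ih fuel _ o d color ho2 hd2 hod ?_ (by omega)]
    · rw [List.getD_eq_getElem _ _ ho2, List.getD_eq_getElem _ _ hd2, hgo2, hgd2]
      have hval1 : List.take (ns[o].dropLast.length - t) ns[o].dropLast
          = List.take (ns[o].length - (t+1)) ns[o] := by
        simp only [List.length_dropLast]
        rw [List.dropLast_eq_take, List.take_take]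
        congr 1
        omega
      have hval2 : ns[d] ++ [color] ++ List.replicate t color
          = ns[d] ++ List.replicate (t+1) color := by
        rw [List.append_assoc, List.singleton_append, ← List.replicate_succ]
      rw [hval1, hval2]
      apply List.ext_getElem
      · simp
      · intro i hi1 hi2
        simp only [List.getElem_set]
        by_cases h1 : d = i
        · simp [h1]
        · by_cases h2 : o = i
          · simp [h1, h2]
          · simp [h1, h2]
    · rw [List.getD_eq_getElem _ _ ho2, List.getD_eq_getElem _ _ hd2, hgo2, hgd2]
      simp only [List.length_append, List.length_singleton]
      omega

-- B's slice is a take ----------------------------------------------------------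

theorem slice_minus_amount (l : List Int) (amount : Int) (h : amount ≤ (l.length : Int)) :
    PySem.List.slice l none (some ((l.length : Int) - amount)) = l.take (l.length - amount.toNat) := by
  rw [PySem.List.slice_to (hb := by omega)]
  by_cases ha : 0 ≤ amount
  · congr 1
    omega
  · rw [List.take_of_length_le (by omega), List.take_of_length_le (by omega)]

-- ===== VERDICT (by name: the statement is the Claim_ definition above) =====
theorem result_spec : Claim_equal_result := by
  unfold Claim_equal_result
  intro state action hdom hpre
  obtain ⟨a1, a2⟩ := action
  unfold Pre_result at hpre
  simp only at hpre
  obtain ⟨ho0, ho1, hd0, hd1, hnonempty, h44⟩ := hpre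
  unfold Spec_result result result_alt
  dsimp only
  have hbo : -(state.length : Int) ≤ a1 - 1 ∧ a1 - 1 < (state.length : Int) := by
    by_cases hc : 0 ≤ a1 - 1
    · rw [if_pos hc] at ho0 ho1; omega
    · rw [if_neg hc] at ho0 ho1; omega
  have hbd : -(state.length : Int) ≤ a2 - 1 ∧ a2 - 1 < (state.length : Int) := by
    by_cases hc : 0 ≤ a2 - 1
    · rw [if_pos hc] at hd0 hd1; omega
    · rw [if_neg hc] at hd0 hd1; omega
  set oI : Int := if 0 ≤ a1 - 1 then a1 - 1 else a1 - 1 + (state.length : Int) with hoI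
  set dI : Int := if 0 ≤ a2 - 1 then a2 - 1 else a2 - 1 + (state.length : Int) with hdI
  have hltO : oI.toNat < state.length := by omega
  have hltD : dI.toNat < state.length := by omega
  have hA : PySem.List.pyGet? state (a1 - 1) = some state[oI.toNat] := by
    rw [pyGet?_inrange state (a1 - 1) hbo.1 hbo.2, ← hoI, List.getElem?_eq_getElem hltO]
  rw [hA]
  dsimp only
  rw [List.getD_eq_getElem _ _ hltO] at hnonempty h44
  obtain ⟨c, hc⟩ : ∃ c, state[oI.toNat].getLast? = some c := by
    cases hlc : state[oI.toNat].getLast? with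
    | none => exact absurd (List.getLast?_eq_none_iff.mp hlc) hnonempty
    | some c => exact ⟨c, rfl⟩
  rw [PySem.List.pyGet?_neg_one, hc]
  dsimp only
  have hB : PySem.List.pyGet? state (a2 - 1) = some state[dI.toNat] := by
    rw [pyGet?_inrange state (a2 - 1) hbd.1 hbd.2, ← hdI, List.getElem?_eq_getElem hltD]
  rw [hB]
  dsimp only
  -- normalize B's two assignments
  have hrle : runLen state[oI.toNat].reverse c ≤ state[oI.toNat].length := by
    have := runLen_le_length state[oI.toNat].reverse c
    simpa using this
  set amount : Int := min ((runLen state[oI.toNat].reverse c : Nat) : Int)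
      (4 - (state[dI.toNat].length : Int)) with ham
  have hamle : amount ≤ (state[oI.toNat].length : Int) := by
    rw [ham]; omega
  have hset1 : pySetAt state (a1 - 1)
      (PySem.List.slice state[oI.toNat] none (some ((state[oI.toNat].length : Int) - amount)))
      = state.set oI.toNat (state[oI.toNat].take (state[oI.toNat].length - amount.toNat)) := by
    rw [slice_minus_amount _ _ hamle, pySetAt_norm state (a1 - 1) _ hbo.1 hbo.2, ← hoI]
  rw [hset1]
  have hlen1 : (state.set oI.toNat (state[oI.toNat].take (state[oI.toNat].length - amount.toNat))).length
      = state.length := by simp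
  have hset2 : pySetAt (state.set oI.toNat (state[oI.toNat].take (state[oI.toNat].length - amount.toNat)))
      (a2 - 1) (state[dI.toNat] ++ List.replicate amount.toNat c)
      = (state.set oI.toNat (state[oI.toNat].take (state[oI.toNat].length - amount.toNat))).set dI.toNat
          (state[dI.toNat] ++ List.replicate amount.toNat c) := by
    rw [pySetAt_norm _ (a2 - 1) _ (by rw [hlen1]; exact hbd.1) (by rw [hlen1]; exact hbd.2), hlen1, ← hdI]
  rw [hset2]
  rw [resultLoop_shift 5 state (a1 - 1) (a2 - 1) oI dI c hbo.1 hbo.2 hbd.1 hbd.2 hoI hdI]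
  clear_value oI dI
  clear hoI hdI hA hB hset1 hset2
  by_cases hod : oI.toNat = dI.toNat
  · -- source and destination are the same flask; Pre_ guarantees it holds ≥ 4 units
    have hIeq : oI = dI := by omega
    subst hIeq
    have h4 : 4 ≤ state[oI.toNat].length := h44 rfl
    rw [show (5 : Nat) = 4 + 1 from rfl, resultLoop]
    rw [PySem.List.pyGet?_of_nonneg state ho0, List.getElem?_eq_getElem hltO]
    simp only [Option.getD_some]
    rw [if_neg (by rintro ⟨-, -, hlt4⟩; omega)]
    have hz : amount.toNat = 0 := by rw [ham]; omega
    rw [hz, List.replicate_zero, List.append_nil, List.set_set, List.set_getElem_self]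
  · -- distinct flasks: the loop performs exactly the bulk transfer B computes
    have hloop := loop_spec amount.toNat 5 state oI.toNat dI.toNat c hltO hltD hod
        (by rw [List.getD_eq_getElem _ _ hltO, List.getD_eq_getElem _ _ hltD, ← ham]) (by omega)
    rw [Int.toNat_of_nonneg ho0, Int.toNat_of_nonneg hd0] at hloop
    rw [hloop, List.getD_eq_getElem _ _ hltO, List.getD_eq_getElem _ _ hltD]
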